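-- pv_equiv track=rewrite | github.com/ThomKaar/CSC321-Lab9 | diffieHellmenMini.py | pad_aes_message
-- ===== SOURCE A (Python) =====
-- def pad_aes_message(message):
--     acc = ''
--     i = 0
--     j = 16
--     while len(message[i:j]) == 16:
--         acc += message[i:j]
--         i += 16
--         j += 16
--     acc += pkcs7(message[i:j])
--     return acc
--
-- def pkcs7(plaintext):
--    if len(plaintext) == 16:
--       pad_len = 16
--    else:
--       pad_len = 16 - len(plaintext)
--    # pad_char = pad_len.to_bytes(1, byteorder='big')
--    pad_char = ';'
--    for i in range(pad_len):
--       plaintext += pad_char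
--    return plaintext
-- ===== SOURCE B (Python) =====
-- def pad_aes_message(message):
--     return message + ';' * (16 - len(message) % 16)
-- ===== Notes on version B (the rewrite author's own statement) =====
-- stated objective: simpler
-- what changed: Replaces the 16-byte block-copy while-loop plus the pkcs7 helper's padding for-loop by a single closed-form expression that appends 16 - len(message) % 16 pad characters in one concatenation.
import Mathlib
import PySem

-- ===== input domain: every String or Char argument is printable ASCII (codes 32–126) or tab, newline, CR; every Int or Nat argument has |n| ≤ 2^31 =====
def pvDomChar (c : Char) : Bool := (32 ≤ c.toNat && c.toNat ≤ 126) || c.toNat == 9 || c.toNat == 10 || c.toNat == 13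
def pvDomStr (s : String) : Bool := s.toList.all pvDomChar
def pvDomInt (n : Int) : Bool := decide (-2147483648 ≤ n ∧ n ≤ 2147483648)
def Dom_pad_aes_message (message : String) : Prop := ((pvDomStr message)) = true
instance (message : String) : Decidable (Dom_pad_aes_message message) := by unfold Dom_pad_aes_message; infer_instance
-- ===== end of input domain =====

-- B replaces A's 16-byte block-copy while-loop and the pkcs7 helper's padding loop
-- with the single closed-form expression message + ';' * (16 - len(message) % 16)  (objective: simpler).


-- ===== PORT A =====
-- helper pkcs7: the if on len == 16, then the for-loop appending pad_char pad_len times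
def pkcs7 (plaintext : List Char) : List Char :=
  let pad_len : Nat := if plaintext.length = 16 then 16 else 16 - plaintext.length
  (List.range pad_len).foldl (fun p _ => p ++ [';']) plaintext

-- the while-loop of pad_aes_message; i, j are the Python loop counters (always naturals here)
def pad_aes_loop (msg : List Char) (acc : List Char) (i j : Nat) : List Char :=
  if h : (PySem.List.slice msg (some (i : Int)) (some (j : Int))).length = 16 then
    pad_aes_loop msg (acc ++ PySem.List.slice msg (some (i : Int)) (some (j : Int))) (i + 16) (j + 16)
  else
    acc ++ pkcs7 (PySem.List.slice msg (some (i : Int)) (some (j : Int)))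
termination_by msg.length + 16 - i
decreasing_by
  rw [PySem.List.slice_natCast] at h
  simp only [List.length_take, List.length_drop] at h
  omega

def pad_aes_message (message : String) : String :=
  String.ofList (pad_aes_loop message.toList [] 0 16)

-- ===== PORT B =====
def pad_aes_message_alt (message : String) : String :=
  String.ofList (message.toList ++ List.replicate (16 - message.toList.length % 16) ';')

-- ===== PRECONDITION & SPEC =====
def Spec_pad_aes_message (message : String) (out : String) : Prop := out = pad_aes_message_alt message
instance (message : String) (out : String) : Decidable (Spec_pad_aes_message message out) := by unfold Spec_pad_aes_message; infer_instance

-- ===== CLAIM (what is proved, stated in full; the proofs are below) =====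
def Claim_equal_pad_aes_message : Prop := ∀ (message : String), Dom_pad_aes_message message → Spec_pad_aes_message message (pad_aes_message message)

-- ===== LEMMAS AND PROOFS =====

lemma foldl_range_append (n : Nat) (p : List Char) (c : Char) :
    (List.range n).foldl (fun q _ => q ++ [c]) p = p ++ List.replicate n c := by
  induction n generalizing p with
  | zero => simp
  | succ m ih =>
    rw [List.range_succ, List.foldl_append]
    simp [ih, List.replicate_succ']

lemma pkcs7_short (plaintext : List Char) (h : plaintext.length < 16) :
    pkcs7 plaintext = plaintext ++ List.replicate (16 - plaintext.length) ';' := by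
  unfold pkcs7
  rw [if_neg (by omega)]
  exact foldl_range_append _ _ _

lemma pad_aes_loop_eq (n : Nat) : ∀ (msg acc : List Char) (i : Nat), msg.length ≤ i + n →
    pad_aes_loop msg acc i (i + 16) =
      acc ++ msg.drop i ++ List.replicate (16 - (msg.length - i) % 16) ';' := by
  induction n with
  | zero =>
    intro msg acc i hn
    rw [pad_aes_loop]
    have hs : PySem.List.slice msg (some (i : Int)) (some ((i + 16 : Nat) : Int)) = msg.drop i := by
      rw [PySem.List.slice_natCast, List.take_of_length_le (by simp; omega)]
    rw [dif_neg (by rw [hs]; simp; omega), hs,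
        pkcs7_short _ (by simp; omega)]
    have h1 : msg.length - i = 0 := by omega
    simp [h1]
  | succ m ih =>
    intro msg acc i hn
    rw [pad_aes_loop]
    by_cases h16 : (PySem.List.slice msg (some (i : Int)) (some ((i + 16 : Nat) : Int))).length = 16
    · have hlen : i + 16 ≤ msg.length := by
        rw [PySem.List.slice_natCast] at h16
        simp only [List.length_take, List.length_drop] at h16
        omega
      rw [dif_pos h16]
      have ih' := ih msg (acc ++ PySem.List.slice msg (some (i : Int)) (some ((i + 16 : Nat) : Int))) (i + 16) (by omega)
      rw [ih']
      have hs : PySem.List.slice msg (some (i : Int)) (some ((i + 16 : Nat) : Int))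
          = (msg.drop i).take 16 := by
        rw [PySem.List.slice_natCast]; congr 1; omega
      have hdrop : msg.drop (i + 16) = (msg.drop i).drop 16 := by
        rw [List.drop_drop]
      have hmod : (msg.length - (i + 16)) % 16 = (msg.length - i) % 16 := by omega
      rw [hs, hdrop, hmod]
      conv_rhs => rw [← List.take_append_drop 16 (List.drop i msg)]
      simp only [List.append_assoc]
    · rw [dif_neg h16]
      have hshort : msg.length < i + 16 := by
        by_contra hge
        apply h16
        rw [PySem.List.slice_natCast]
        simp only [List.length_take, List.length_drop]
        omega
      have hs : PySem.List.slice msg (some (i : Int)) (some ((i + 16 : Nat) : Int)) = msg.drop i := by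
        rw [PySem.List.slice_natCast, List.take_of_length_le (by simp; omega)]
      rw [hs, pkcs7_short _ (by simp; omega)]
      have hmod : (msg.length - i) % 16 = msg.length - i := by omega
      simp [hmod]

-- ===== VERDICT (by name: the statement is the Claim_ definition above) =====
theorem pad_aes_message_spec : Claim_equal_pad_aes_message := by
  intro message _
  unfold Spec_pad_aes_message pad_aes_message pad_aes_message_alt
  have h := pad_aes_loop_eq message.toList.length message.toList [] 0 (by omega)
  simp only [Nat.zero_add, List.drop_zero, List.nil_append, Nat.sub_zero] at h
  rw [show (16 : Nat) = 0 + 16 from rfl, h]
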